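-- pv_equiv track=rewrite | github.com/TadeoRochas/Algoritmos2025 | Recursividad/ejercicio22_recursiv.py | usar_la_fuerza
-- ===== SOURCE A (Python) =====
-- def usar_la_fuerza(mochila_luck,contador=0):
--     if not mochila_luck:
--         return False, contador
--     objeto = mochila_luck[0]
--     if objeto == "sable de luz":
--         contador += 1
--         return True, contador
--     else:
--         resultado, contador = usar_la_fuerza(mochila_luck[1:], contador)
--         if resultado:
--             return True, contador
--         else:
--             return False, contador
-- ===== SOURCE B (Python) =====
-- def usar_la_fuerza(mochila_luck, contador=0):
--     if "sable de luz" in mochila_luck: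
--         return True, contador + 1
--     return False, contador
-- ===== Notes on version B (the rewrite author's own statement) =====
-- stated objective: simpler
-- what changed: Replaces the element-by-element recursion (with its result-threading tail logic) by a single membership test that decides both the flag and whether contador is incremented once.
import Mathlib
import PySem

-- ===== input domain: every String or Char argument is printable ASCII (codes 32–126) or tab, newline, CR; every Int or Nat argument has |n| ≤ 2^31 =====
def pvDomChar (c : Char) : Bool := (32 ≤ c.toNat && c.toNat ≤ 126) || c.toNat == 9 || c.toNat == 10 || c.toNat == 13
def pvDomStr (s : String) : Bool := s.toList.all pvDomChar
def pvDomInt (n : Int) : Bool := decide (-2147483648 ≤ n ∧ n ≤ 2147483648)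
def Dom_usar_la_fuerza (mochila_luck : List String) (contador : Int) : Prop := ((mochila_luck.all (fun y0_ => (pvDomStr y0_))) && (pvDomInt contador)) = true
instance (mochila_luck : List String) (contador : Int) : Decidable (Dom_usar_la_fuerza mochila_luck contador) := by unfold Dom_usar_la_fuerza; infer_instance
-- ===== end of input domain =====

-- ===== PORT A =====
-- B replaces A's recursion by one membership test; same return value everywhere.
def usar_la_fuerza (mochila_luck : List String) (contador : Int) : Bool × Int :=
  match mochila_luck with
  | [] => (false, contador)
  | objeto :: rest =>
    if objeto = "sable de luz" then (true, contador + 1)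
    else
      let r := usar_la_fuerza rest contador
      if r.1 then (true, r.2) else (false, r.2)

-- ===== PORT B =====
def usar_la_fuerza_alt (mochila_luck : List String) (contador : Int) : Bool × Int :=
  if mochila_luck.contains "sable de luz" then (true, contador + 1)
  else (false, contador)

-- ===== PRECONDITION & SPEC =====
def Spec_usar_la_fuerza (mochila_luck : List String) (contador : Int) (out : Bool × Int) : Prop := out = usar_la_fuerza_alt mochila_luck contador
instance (mochila_luck : List String) (contador : Int) (out : Bool × Int) : Decidable (Spec_usar_la_fuerza mochila_luck contador out) := by unfold Spec_usar_la_fuerza; infer_instance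

-- ===== CLAIM (what is proved, stated in full; the proofs are below) =====
def Claim_equal_usar_la_fuerza : Prop := ∀ (mochila_luck : List String) (contador : Int), Dom_usar_la_fuerza mochila_luck contador → Spec_usar_la_fuerza mochila_luck contador (usar_la_fuerza mochila_luck contador)

-- ===== LEMMAS AND PROOFS =====

-- ===== VERDICT (by name: the statement is the Claim_ definition above) =====
theorem usar_la_fuerza_eq (mochila_luck : List String) (contador : Int) :
    usar_la_fuerza mochila_luck contador = usar_la_fuerza_alt mochila_luck contador := by
  induction mochila_luck with
  | nil => simp [usar_la_fuerza, usar_la_fuerza_alt]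
  | cons x rest ih =>
    by_cases hx : x = "sable de luz"
    · simp [usar_la_fuerza, usar_la_fuerza_alt, hx]
    · by_cases hm : "sable de luz" ∈ rest <;>
        simp [usar_la_fuerza, usar_la_fuerza_alt, hx, hm, ih, Ne.symm hx]

theorem usar_la_fuerza_spec : Claim_equal_usar_la_fuerza := by
  intro mochila_luck contador _
  unfold Spec_usar_la_fuerza
  exact usar_la_fuerza_eq mochila_luck contador
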